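-- pv_equiv track=rewrite | github.com/CodeWebMobile-AI/cwmai | scripts/research_need_analyzer.py | _extract_claude_error_patterns
-- ===== SOURCE A (Python) =====
-- from typing import Dict, List, Optional, Tuple
--
-- def _extract_claude_error_patterns(recent_errors: List) -> List[str]:
--     """Extract Claude-specific error patterns from recent errors."""
--     patterns = []
--
--     # Analyze error messages for Claude-related issues
--     claude_errors = [error for error in recent_errors
--                     if 'claude' in str(error).lower() or 'anthropic' in str(error).lower()]
--
--     if len(claude_errors) > 3:
--         patterns.append("Frequent Claude API errors detected")
--
--     # Look for authentication errors
--     auth_errors = [error for error in recent_errors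
--                   if any(keyword in str(error).lower()
--                         for keyword in ['auth', 'token', 'key', 'permission'])]
--
--     if auth_errors:
--         patterns.append("Authentication/API key issues detected")
--
--     # Look for formatting errors
--     format_errors = [error for error in recent_errors
--                     if any(keyword in str(error).lower()
--                           for keyword in ['format', 'json', 'parse', 'invalid'])]
--
--     if format_errors:
--         patterns.append("Request/response formatting issues detected")
--
--     return patterns
-- ===== SOURCE B (Python) =====
-- AUTH_KEYWORDS = ('auth', 'token', 'key', 'permission')
-- FORMAT_KEYWORDS = ('format', 'json', 'parse', 'invalid')
--
-- def _extract_claude_error_patterns(recent_errors):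
--     """Single pass: lowercase each error once, keep a count and two flags."""
--     claude_count = 0
--     has_auth = False
--     has_format = False
--     for error in recent_errors:
--         s = str(error).lower()
--         if 'claude' in s or 'anthropic' in s:
--             claude_count += 1
--         if not has_auth and any(k in s for k in AUTH_KEYWORDS):
--             has_auth = True
--         if not has_format and any(k in s for k in FORMAT_KEYWORDS):
--             has_format = True
--     patterns = []
--     if claude_count > 3:
--         patterns.append("Frequent Claude API errors detected")
--     if has_auth:
--         patterns.append("Authentication/API key issues detected")
--     if has_format:
--         patterns.append("Request/response formatting issues detected")
--     return patterns
-- ===== Notes on version B (the rewrite author's own statement) =====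
-- stated objective: alternative
-- what changed: Three separate list-comprehension filters (each lowercasing every error repeatedly) are replaced by one fold over the list that lowercases each error once and maintains a count and two sticky flags.
import Mathlib
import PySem

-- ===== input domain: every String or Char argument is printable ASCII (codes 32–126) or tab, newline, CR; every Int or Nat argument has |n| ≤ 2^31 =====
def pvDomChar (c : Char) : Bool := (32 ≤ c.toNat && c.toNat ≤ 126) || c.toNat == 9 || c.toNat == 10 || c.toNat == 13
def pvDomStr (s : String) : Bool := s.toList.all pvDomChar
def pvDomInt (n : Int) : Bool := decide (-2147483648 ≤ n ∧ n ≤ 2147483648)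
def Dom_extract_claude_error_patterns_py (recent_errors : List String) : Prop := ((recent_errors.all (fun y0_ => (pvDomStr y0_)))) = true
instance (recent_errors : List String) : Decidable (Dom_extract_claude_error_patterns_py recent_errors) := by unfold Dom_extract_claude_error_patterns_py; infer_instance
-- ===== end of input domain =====

-- ===== PORT A =====
-- A: three list-comprehension filters, then three conditional appends.
def extract_claude_error_patterns_py (recent_errors : List String) : List String :=
  let patterns : List String := []
  let claude_errors := recent_errors.filter (fun error =>
    PySem.Str.isIn "claude" (PySem.Str.lower error) || PySem.Str.isIn "anthropic" (PySem.Str.lower error))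
  let patterns := if claude_errors.length > 3 then patterns ++ ["Frequent Claude API errors detected"] else patterns
  let auth_errors := recent_errors.filter (fun error =>
    (["auth", "token", "key", "permission"] : List String).any (fun keyword => PySem.Str.isIn keyword (PySem.Str.lower error)))
  let patterns := if auth_errors ≠ [] then patterns ++ ["Authentication/API key issues detected"] else patterns
  let format_errors := recent_errors.filter (fun error =>
    (["format", "json", "parse", "invalid"] : List String).any (fun keyword => PySem.Str.isIn keyword (PySem.Str.lower error)))
  let patterns := if format_errors ≠ [] then patterns ++ ["Request/response formatting issues detected"] else patterns
  patterns

-- ===== PORT B =====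
-- B: one pass, lowercasing each error once, keeping a count and two flags.
def pvAuthKeywords : List String := ["auth", "token", "key", "permission"]
def pvFormatKeywords : List String := ["format", "json", "parse", "invalid"]

def extract_claude_error_patterns_py_alt (recent_errors : List String) : List String :=
  let st := recent_errors.foldl (fun (st : Int × Bool × Bool) error =>
    let s := PySem.Str.lower error
    ( (if PySem.Str.isIn "claude" s || PySem.Str.isIn "anthropic" s then st.1 + 1 else st.1),
      (if !st.2.1 && pvAuthKeywords.any (fun k => PySem.Str.isIn k s) then true else st.2.1),
      (if !st.2.2 && pvFormatKeywords.any (fun k => PySem.Str.isIn k s) then true else st.2.2) ))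
    (0, false, false)
  (if st.1 > 3 then ["Frequent Claude API errors detected"] else []) ++
  (if st.2.1 then ["Authentication/API key issues detected"] else []) ++
  (if st.2.2 then ["Request/response formatting issues detected"] else [])

-- ===== PRECONDITION & SPEC =====
def Spec_extract_claude_error_patterns_py (recent_errors : List String) (out : List String) : Prop := out = extract_claude_error_patterns_py_alt recent_errors
instance (recent_errors : List String) (out : List String) : Decidable (Spec_extract_claude_error_patterns_py recent_errors out) := by unfold Spec_extract_claude_error_patterns_py; infer_instance

-- ===== CLAIM (what is proved, stated in full; the proofs are below) =====
def Claim_equal_extract_claude_error_patterns_py : Prop := ∀ (recent_errors : List String), Dom_extract_claude_error_patterns_py recent_errors → Spec_extract_claude_error_patterns_py recent_errors (extract_claude_error_patterns_py recent_errors)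

-- ===== LEMMAS AND PROOFS =====
theorem pv_fold_char (pc : String → Bool) (pa : String → Bool) (pf : String → Bool)
    (l : List String) : ∀ (c : Int) (b1 b2 : Bool),
    l.foldl (fun (st : Int × Bool × Bool) error =>
      ( (if pc error then st.1 + 1 else st.1),
        (if !st.2.1 && pa error then true else st.2.1),
        (if !st.2.2 && pf error then true else st.2.2) )) (c, b1, b2)
      = (c + (l.countP pc : Int), b1 || l.any pa, b2 || l.any pf) := by
  induction l with
  | nil => intro c b1 b2; simp
  | cons x xs ih =>
    intro c b1 b2
    simp only [List.foldl_cons, List.countP_cons, List.any_cons, ih, Prod.mk.injEq]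
    refine ⟨?_, ?_, ?_⟩
    · split <;> push_cast <;> ring
    · cases b1 <;> cases pa x <;> simp
    · cases b2 <;> cases pf x <;> simp

theorem pv_filter_ne_nil_iff_any (p : String → Bool) (l : List String) :
    (l.filter p ≠ []) ↔ l.any p = true := by
  rw [Ne, List.filter_eq_nil_iff, List.any_eq_true]
  push Not
  simp

-- ===== VERDICT (by name: the statement is the Claim_ definition above) =====
theorem extract_claude_error_patterns_py_spec : Claim_equal_extract_claude_error_patterns_py := by
  intro l _
  show extract_claude_error_patterns_py l = extract_claude_error_patterns_py_alt l
  unfold extract_claude_error_patterns_py extract_claude_error_patterns_py_alt pvAuthKeywords pvFormatKeywords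
  simp only [pv_fold_char]
  have h3 : ∀ n : Nat, ((3:Int) < 0 + (n:Int)) ↔ 3 < n := by intro n; omega
  simp only [← List.countP_eq_length_filter, h3, Bool.false_or, pv_filter_ne_nil_iff_any]
  split_ifs <;> simp
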